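-- pv_equiv track=rewrite | github.com/AdityaJoshiJ/DSA | HackerRank new/Other/Type-Writing.py | callme
-- ===== SOURCE A (Python) =====
-- def callme(operationString, position, result, input3, prevResult):
--     if position >= len(operationString):
--         return result
--     else:
--         char = operationString[position]
--         if char == 'w':
--             prevResult = result
--             result = callme(operationString, position +
--                             1, result, input3, prevResult)
--         elif char == 'd':
--             prevResult = result
--             result = result[:-input3]
--             result = callme(operationString, position +
--                             1, result, input3, prevResult)
--         elif char == 'u':
--             result = callme(operationString, position +
--                             1, prevResult, input3, result)
--         else:
--             result = result + char
--             result = callme(operationString, position +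
--                             1, result, input3, prevResult)
--     return result
-- ===== SOURCE B (Python) =====
-- def callme(operationString, position, result, input3, prevResult):
--     for i in range(position, len(operationString)):
--         char = operationString[i]
--         if char == 'w':
--             prevResult = result
--         elif char == 'd':
--             result, prevResult = result[:-input3], result
--         elif char == 'u':
--             result, prevResult = prevResult, result
--         else:
--             result = result + char
--     return result
-- ===== Notes on version B (the rewrite author's own statement) =====
-- stated objective: simpler
-- what changed: Replaces A's tail recursion (re-passing all five arguments on every character) by a single iterative for-loop over the remaining indices that threads only the (result, prevResult) pair.
import Mathlib
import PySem

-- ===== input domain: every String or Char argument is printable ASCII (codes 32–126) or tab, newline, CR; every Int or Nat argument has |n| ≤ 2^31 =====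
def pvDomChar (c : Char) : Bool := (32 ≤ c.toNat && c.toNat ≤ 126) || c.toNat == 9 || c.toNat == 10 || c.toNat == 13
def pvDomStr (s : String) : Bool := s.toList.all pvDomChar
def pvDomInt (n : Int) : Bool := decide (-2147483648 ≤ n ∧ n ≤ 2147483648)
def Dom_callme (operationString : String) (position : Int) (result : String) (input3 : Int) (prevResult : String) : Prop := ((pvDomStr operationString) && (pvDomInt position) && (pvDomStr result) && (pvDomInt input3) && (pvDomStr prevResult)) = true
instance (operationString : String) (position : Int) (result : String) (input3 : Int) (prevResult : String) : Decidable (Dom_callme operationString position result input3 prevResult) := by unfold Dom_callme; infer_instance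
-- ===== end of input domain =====

-- B replaces A's five-argument tail recursion by one iterative loop threading only (result, prevResult); same cost, plainer shape.

-- ===== PORT A =====
-- literal port of A's recursion, on List Char (String.toList at the wrapper)
def callmeA (s : List Char) (pos : Int) (res : List Char) (k : Int) (prev : List Char) : List Char :=
  if _h : pos ≥ (s.length : Int) then res
  else
    match PySem.List.pyGet? s pos with
    | none => res  -- Python raises IndexError here; excluded by Pre_callme
    | some c =>
      if c = 'w' then callmeA s (pos + 1) res k res
      else if c = 'd' then callmeA s (pos + 1) (PySem.List.slice res none (some (-k))) k res
      else if c = 'u' then callmeA s (pos + 1) prev k res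
      else callmeA s (pos + 1) (res ++ [c]) k prev
termination_by ((s.length : Int) - pos).toNat
decreasing_by all_goals omega

def callme (operationString : String) (position : Int) (result : String) (input3 : Int) (prevResult : String) : String :=
  String.ofList (callmeA operationString.toList position result.toList input3 prevResult.toList)

-- ===== PORT B =====
-- one loop body step on the state pair (result, prevResult)
def stepB (s : List Char) (k : Int) (st : List Char × List Char) (i : Int) : List Char × List Char :=
  match PySem.List.pyGet? s i with
  | none => st  -- Python raises IndexError here; excluded by Pre_callme
  | some c =>
    if c = 'w' then (st.1, st.1)
    else if c = 'd' then (PySem.List.slice st.1 none (some (-k)), st.1)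
    else if c = 'u' then (st.2, st.1)
    else (st.1 ++ [c], st.2)

def callme_alt (operationString : String) (position : Int) (result : String) (input3 : Int) (prevResult : String) : String :=
  String.ofList (((PySem.List.pyRange position (operationString.toList.length : Int) 1).foldl
    (stepB operationString.toList input3) (result.toList, prevResult.toList)).1)

-- ===== PRECONDITION & SPEC =====
-- Pre_ excludes exactly position < -len(operationString), where Python A raises IndexError at the first index access.
def Pre_callme (operationString : String) (position : Int) (result : String) (input3 : Int) (prevResult : String) : Prop :=
  -(operationString.toList.length : Int) ≤ position
instance (operationString : String) (position : Int) (result : String) (input3 : Int) (prevResult : String) : Decidable (Pre_callme operationString position result input3 prevResult) := by unfold Pre_callme; infer_instance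

def pvWitness_callme : String × Int × String × Int × String := ("wadxu", 0, "ab", 1, "p")

def Spec_callme (operationString : String) (position : Int) (result : String) (input3 : Int) (prevResult : String) (out : String) : Prop := out = callme_alt operationString position result input3 prevResult
instance (operationString : String) (position : Int) (result : String) (input3 : Int) (prevResult : String) (out : String) : Decidable (Spec_callme operationString position result input3 prevResult out) := by unfold Spec_callme; infer_instance

-- ===== CLAIM (what is proved, stated in full; the proofs are below) =====
def Claim_equal_callme : Prop := ∀ (operationString : String) (position : Int) (result : String) (input3 : Int) (prevResult : String), Dom_callme operationString position result input3 prevResult → Pre_callme operationString position result input3 prevResult → Spec_callme operationString position result input3 prevResult (callme operationString position result input3 prevResult)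

-- ===== LEMMAS AND PROOFS =====

lemma callmeA_eq_foldl (s : List Char) (k : Int) :
    ∀ (n : Nat) (pos : Int) (res prev : List Char),
      -(s.length : Int) ≤ pos → ((s.length : Int) - pos).toNat = n →
      callmeA s pos res k prev =
        ((PySem.List.pyRange pos (s.length : Int) 1).foldl (stepB s k) (res, prev)).1 := by
  intro n
  induction n with
  | zero =>
    intro pos res prev _ hn
    have hge : pos ≥ (s.length : Int) := by omega
    rw [callmeA, dif_pos hge, PySem.List.pyRange_one_eq_nil hge]
    rfl
  | succ n ih =>
    intro pos res prev hlo hn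
    have hlt : pos < (s.length : Int) := by omega
    have hin : ¬ (PySem.List.pyGet? s pos = none) := by
      rw [PySem.List.pyGet?_eq_none_iff]
      simp [PySem.Raise.InRange]
      omega
    obtain ⟨c, hc⟩ := Option.ne_none_iff_exists'.mp hin
    rw [PySem.List.pyRange_one_cons hlt, List.foldl_cons, callmeA, dif_neg (by omega)]
    simp only [hc, stepB]
    split_ifs <;> exact ih (pos + 1) _ _ (by omega) (by omega)

-- ===== VERDICT (by name: the statement is the Claim_ definition above) =====
theorem callme_spec : Claim_equal_callme := by
  intro op pos res k prev _ hpre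
  unfold Spec_callme callme callme_alt
  exact congrArg String.ofList
    (callmeA_eq_foldl op.toList k (((op.toList.length : Int) - pos).toNat) pos res.toList prev.toList hpre rfl)
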